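-- pv_equiv track=rewrite | github.com/DanielKusyDev/Bushelper-DjangoApp | custom/scrapers.py | proper_course_types
-- ===== SOURCE A (Python) =====
-- def proper_course_types(types):
--     for t in types:
--         c_type = str(t).lower()
--         if 'powszedni' in c_type:
--             yield 'D'
--         elif 'sobot' in c_type:
--             yield 'E'
--         elif 'niedz' in c_type or 'świąt' in c_type:
--             yield 'E7'
--         elif 'nocn' in c_type:
--             yield 'DE7'
--         else:
--             yield t
-- ===== SOURCE B (Python) =====
-- _PATTERNS = [
--     ('powszedni', 'D'),
--     ('sobot', 'E'),
--     ('niedz', 'E7'),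
--     ('świąt', 'E7'),
--     ('nocn', 'DE7'),
-- ]
--
-- def proper_course_types(types):
--     # Keyword-major staged passes: for each pattern (in precedence order) sweep
--     # the whole list once, assigning its code to still-unassigned items whose
--     # lowered text contains the keyword. First write wins = A's precedence.
--     items = list(types)
--     lowered = [str(t).lower() for t in items]
--     codes = [None] * len(items)
--     for kw, code in _PATTERNS:
--         for i, c in enumerate(lowered):
--             if codes[i] is None and kw in c:
--                 codes[i] = code
--     for t, code in zip(items, codes):
--         yield t if code is None else code
-- ===== Notes on version B (the rewrite author's own statement) =====
-- stated objective: alternative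
-- what changed: Replaces A's item-major if/elif chain with keyword-major staged passes: for each pattern in precedence order one sweep over the whole list assigns its code to still-unassigned items (first write wins), then a final zip fills unmatched items with the original text.
import Mathlib
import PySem

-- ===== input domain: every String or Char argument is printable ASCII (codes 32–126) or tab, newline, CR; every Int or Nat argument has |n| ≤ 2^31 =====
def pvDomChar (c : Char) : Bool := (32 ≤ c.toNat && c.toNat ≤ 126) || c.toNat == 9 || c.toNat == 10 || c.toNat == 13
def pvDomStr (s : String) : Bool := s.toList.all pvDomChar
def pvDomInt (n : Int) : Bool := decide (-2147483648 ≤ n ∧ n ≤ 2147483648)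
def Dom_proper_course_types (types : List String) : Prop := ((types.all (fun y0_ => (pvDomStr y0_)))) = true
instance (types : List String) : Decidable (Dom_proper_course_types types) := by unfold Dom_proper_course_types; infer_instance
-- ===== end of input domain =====

-- B replaces A's per-item if/elif chain with keyword-major staged passes
-- (one sweep per pattern, first write wins); both Pythons are generators, the
-- equivalence is about the yielded sequence, ported as the returned list.

-- ===== PORT A =====
def proper_course_types (types : List String) : List String :=
  types.map (fun t =>
    let c_type := PySem.Str.lower t
    if PySem.Str.isIn "powszedni" c_type then "D"
    else if PySem.Str.isIn "sobot" c_type then "E"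
    else if PySem.Str.isIn "niedz" c_type || PySem.Str.isIn "świąt" c_type then "E7"
    else if PySem.Str.isIn "nocn" c_type then "DE7"
    else t)

-- ===== PORT B =====
def pvPatterns : List (String × String) :=
  [("powszedni", "D"), ("sobot", "E"), ("niedz", "E7"), ("świąt", "E7"), ("nocn", "DE7")]

-- one sweep of a single pattern over the lowered texts and current codes (inner for-loop of B)
def pvSweep (kw code : String) (lowered : List String) (codes : List (Option String)) : List (Option String) :=
  List.zipWith (fun c cur =>
    match cur with
    | some x => some x
    | none => if PySem.Str.isIn kw c then some code else none) lowered codes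

def proper_course_types_alt (types : List String) : List String :=
  let lowered := types.map PySem.Str.lower
  let codes := pvPatterns.foldl (fun cs (p : String × String) => pvSweep p.1 p.2 lowered cs)
                 (types.map (fun _ => (none : Option String)))
  List.zipWith (fun t cur =>
    match cur with
    | some code => code
    | none => t) types codes

-- ===== PRECONDITION & SPEC =====
def Spec_proper_course_types (types : List String) (out : List String) : Prop := out = proper_course_types_alt types
instance (types : List String) (out : List String) : Decidable (Spec_proper_course_types types out) := by unfold Spec_proper_course_types; infer_instance

-- ===== CLAIM =====
def Claim_equal_proper_course_types : Prop := ∀ (types : List String), Dom_proper_course_types types → Spec_proper_course_types types (proper_course_types types)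

-- ===== LEMMAS AND PROOFS =====
theorem pv_alt_eq (types : List String) :
    proper_course_types_alt types = proper_course_types types := by
  unfold proper_course_types_alt proper_course_types pvPatterns
  simp only [List.foldl_cons, List.foldl_nil, pvSweep]
  induction types with
  | nil => rfl
  | cons t ts ih =>
    simp only [List.map_cons, List.zipWith_cons_cons]
    refine congrArg₂ _ ?_ ih
    generalize PySem.Str.isIn "powszedni" (PySem.Str.lower t) = a
    generalize PySem.Str.isIn "sobot" (PySem.Str.lower t) = b
    generalize PySem.Str.isIn "niedz" (PySem.Str.lower t) = c
    generalize PySem.Str.isIn "świąt" (PySem.Str.lower t) = d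
    generalize PySem.Str.isIn "nocn" (PySem.Str.lower t) = e
    cases a <;> cases b <;> cases c <;> cases d <;> cases e <;> rfl

-- ===== VERDICT =====
theorem proper_course_types_spec : Claim_equal_proper_course_types := by
  intro types _
  unfold Spec_proper_course_types
  exact (pv_alt_eq types).symm
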